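-- pv_equiv track=rewrite | github.com/Durgesh-AI-Raise/scrum | detection_service.py | determine_abuse_type
-- ===== SOURCE A (Python) =====
-- from typing import List, Dict, Any, Optional
--
-- def determine_abuse_type(flags: List[Dict[str, Any]]) -> str:
--     """Maps detected flags to a primary abuse type."""
--     if any(f["type"] == "rapid_posting" for f in flags):
--         return "Spam"
--     if any(f["type"] == "keyword_stuffing" for f in flags):
--         return "Keyword Stuffing"
--     if any(f["type"] == "unusual_rating" for f in flags):
--         return "Rating Manipulation"
--     return "General Abuse" # Fallback
-- ===== SOURCE B (Python) =====
-- def determine_abuse_type(flags):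
--     """Maps detected flags to a primary abuse type (single pass over flags)."""
--     PRIORITY = {'rapid_posting': 0, 'keyword_stuffing': 1, 'unusual_rating': 2}
--     LABELS = ('Spam', 'Keyword Stuffing', 'Rating Manipulation')
--     best = None
--     for f in flags:
--         p = PRIORITY.get(f['type'])
--         if p is not None and (best is None or p < best):
--             best = p
--             if best == 0:
--                 break
--     return LABELS[best] if best is not None else 'General Abuse'
-- ===== Notes on version B (the rewrite author's own statement) =====
-- stated objective: alternative
-- what changed: Replaces A's three separate any-scans with one single pass that tracks the minimum priority via a priority map and exits early on the top priority.
import Mathlib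
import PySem

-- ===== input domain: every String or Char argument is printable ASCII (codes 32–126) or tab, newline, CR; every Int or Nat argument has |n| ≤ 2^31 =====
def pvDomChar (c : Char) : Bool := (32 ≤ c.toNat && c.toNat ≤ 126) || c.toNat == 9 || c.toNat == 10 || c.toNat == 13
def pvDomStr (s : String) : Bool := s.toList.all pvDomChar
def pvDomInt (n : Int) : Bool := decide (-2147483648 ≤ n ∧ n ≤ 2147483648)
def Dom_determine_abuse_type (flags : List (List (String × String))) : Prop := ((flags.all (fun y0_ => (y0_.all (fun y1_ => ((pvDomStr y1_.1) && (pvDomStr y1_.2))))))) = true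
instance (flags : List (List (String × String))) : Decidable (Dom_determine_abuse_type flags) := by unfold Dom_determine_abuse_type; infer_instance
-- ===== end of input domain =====

-- B makes one pass tracking the minimum priority instead of A's three any-scans; return values are proved equal on Pre_ (where the Python A returns).

-- ===== PORT A =====
-- three 'any' scans, in A's order; f["type"] ported as Dict.get? (Pre_ excludes the KeyError inputs)
def determine_abuse_type (flags : List (List (String × String))) : String :=
  if flags.any (fun f => (PySem.Dict.mk f).get? "type" == some "rapid_posting") then "Spam"
  else if flags.any (fun f => (PySem.Dict.mk f).get? "type" == some "keyword_stuffing") then "Keyword Stuffing"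
  else if flags.any (fun f => (PySem.Dict.mk f).get? "type" == some "unusual_rating") then "Rating Manipulation"
  else "General Abuse"

-- ===== PORT B =====
-- PRIORITY.get(f['type']) (Pre_ excludes the KeyError inputs of the subscript)
def prioOf_B (f : List (String × String)) : Option Nat :=
  let t := (PySem.Dict.mk f).get? "type"
  if t == some "rapid_posting" then some 0
  else if t == some "keyword_stuffing" then some 1
  else if t == some "unusual_rating" then some 2
  else none

-- the for-loop over flags with accumulator 'best' and the early 'break' at priority 0
def loop_B : List (List (String × String)) → Option Nat → Option Nat
  | [], best => best
  | f :: rest, best =>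
    match prioOf_B f with
    | none => loop_B rest best
    | some p =>
      if best = none ∨ (∃ b, best = some b ∧ p < b) then
        (if p = 0 then some 0 else loop_B rest (some p))
      else loop_B rest best

def label_B : Option Nat → String
  | some 0 => "Spam"
  | some 1 => "Keyword Stuffing"
  | some 2 => "Rating Manipulation"
  | _ => "General Abuse"

def determine_abuse_type_alt (flags : List (List (String × String))) : String :=
  label_B (loop_B flags none)

-- ===== PRECONDITION & SPEC =====
-- Pre_ excludes exactly the inputs on which the Python A raises KeyError: a flag without a
-- "type" key occurring before any 'rapid_posting' flag (A's first scan reads that prefix).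
def Pre_determine_abuse_type (flags : List (List (String × String))) : Prop :=
  ∀ f ∈ flags.takeWhile (fun f => !((PySem.Dict.mk f).get? "type" == some "rapid_posting")),
    ((PySem.Dict.mk f).get? "type").isSome
instance (flags : List (List (String × String))) : Decidable (Pre_determine_abuse_type flags) := by unfold Pre_determine_abuse_type; infer_instance

def pvWitness_determine_abuse_type : (List (List (String × String))) :=
  [[("type", "unusual_rating")], [("type", "keyword_stuffing")]]

def Spec_determine_abuse_type (flags : List (List (String × String))) (out : String) : Prop := out = determine_abuse_type_alt flags
instance (flags : List (List (String × String))) (out : String) : Decidable (Spec_determine_abuse_type flags out) := by unfold Spec_determine_abuse_type; infer_instance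

-- ===== CLAIM (what is proved, stated in full; the proofs are below) =====
def Claim_equal_determine_abuse_type : Prop := ∀ (flags : List (List (String × String))), Dom_determine_abuse_type flags → Pre_determine_abuse_type flags → Spec_determine_abuse_type flags (determine_abuse_type flags)

-- ===== LEMMAS AND PROOFS =====

-- option-min combinator describing one loop step
def omin : Option Nat → Option Nat → Option Nat
  | none, b => b
  | a, none => a
  | some x, some y => some (min x y)

lemma omin_none_right (a : Option Nat) : omin a none = a := by cases a <;> rfl

lemma omin_assoc (a b c : Option Nat) : omin (omin a b) c = omin a (omin b c) := by
  cases a <;> cases b <;> cases c <;> simp [omin, Nat.min_assoc]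

lemma foldl_omin_zero (l : List (Option Nat)) :
    List.foldl omin (some 0) l = some 0 := by
  induction l with
  | nil => rfl
  | cons x xs ih => cases x <;> simpa [omin] using ih

-- the loop is the fold of omin (the break at 0 is harmless: 0 is the minimum)
lemma loop_eq_foldl (flags : List (List (String × String))) (best : Option Nat) :
    loop_B flags best = List.foldl omin best (flags.map prioOf_B) := by
  induction flags generalizing best with
  | nil => rfl
  | cons f rest ih =>
    simp only [loop_B, List.map_cons, List.foldl_cons]
    rcases hp : prioOf_B f with _ | p
    · simpa [omin_none_right] using ih best
    · dsimp only
      rcases best with _ | b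
      · rw [if_pos (Or.inl rfl)]
        by_cases h0 : p = 0
        · subst h0; simp [omin, foldl_omin_zero]
        · simp [h0, omin, ih]
      · by_cases hlt : p < b
        · rw [if_pos (Or.inr ⟨b, rfl, hlt⟩)]
          by_cases h0 : p = 0
          · subst h0
            simp [omin, foldl_omin_zero]
          · simp [h0, omin, Nat.min_eq_right (Nat.le_of_lt hlt), ih]
        · rw [if_neg]
          · simp [omin, Nat.min_eq_left (Nat.le_of_not_lt hlt), ih]
          · rintro (h | ⟨b', hb, hlt'⟩)
            · exact (Option.some_ne_none b) h
            · cases hb; exact hlt hlt'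

-- the value A's nested ifs compute, as an Option Nat
def rhsMin (flags : List (List (String × String))) : Option Nat :=
  if flags.any (fun f => (PySem.Dict.mk f).get? "type" == some "rapid_posting") then some 0
  else if flags.any (fun f => (PySem.Dict.mk f).get? "type" == some "keyword_stuffing") then some 1
  else if flags.any (fun f => (PySem.Dict.mk f).get? "type" == some "unusual_rating") then some 2
  else none

lemma rhsMin_cons (f : List (String × String)) (rest : List (List (String × String))) :
    rhsMin (f :: rest) = omin (prioOf_B f) (rhsMin rest) := by
  simp only [rhsMin, prioOf_B, List.any_cons, Bool.or_eq_true]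
  by_cases h0 : ((PySem.Dict.mk f).get? "type" == some "rapid_posting") = true <;>
  by_cases h1 : ((PySem.Dict.mk f).get? "type" == some "keyword_stuffing") = true <;>
  by_cases h2 : ((PySem.Dict.mk f).get? "type" == some "unusual_rating") = true <;>
  by_cases a0 : (rest.any fun f => (PySem.Dict.mk f).get? "type" == some "rapid_posting") = true <;>
  by_cases a1 : (rest.any fun f => (PySem.Dict.mk f).get? "type" == some "keyword_stuffing") = true <;>
  by_cases a2 : (rest.any fun f => (PySem.Dict.mk f).get? "type" == some "unusual_rating") = true <;>
  simp [h0, h1, h2, a0, a1, a2, omin]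

lemma foldl_eq_rhsMin (flags : List (List (String × String))) (best : Option Nat) :
    List.foldl omin best (flags.map prioOf_B) = omin best (rhsMin flags) := by
  induction flags generalizing best with
  | nil => simp [rhsMin, omin_none_right]
  | cons f rest ih =>
    simp only [List.map_cons, List.foldl_cons, rhsMin_cons, ← omin_assoc, ih]

-- ===== VERDICT (by name: the statement is the Claim_ definition above) =====
theorem determine_abuse_type_spec : Claim_equal_determine_abuse_type := by
  intro flags _ _
  unfold Spec_determine_abuse_type determine_abuse_type determine_abuse_type_alt
  rw [loop_eq_foldl, foldl_eq_rhsMin]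
  simp only [omin]
  unfold rhsMin
  split_ifs <;> rfl
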